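-- pv_equiv track=rewrite | github.com/Jhonattan-rocha/Meus-Projetos | Python/Minha_Biblioteca/Teste2.py | Enumero
-- ===== SOURCE A (Python) =====
-- def Enumero(digitado=""):
--     veredito = True
--     digitado = str(digitado)
--     for c in range(0, len(digitado)):
--         for l in range(0, 10):
--             if digitado[c] not in " 0123456789":
--                 veredito = False
--                 break
--         if not veredito:
--             break
--     return veredito
-- ===== SOURCE B (Python) =====
-- def Enumero(digitado=""):
--     return str(digitado).strip(" 0123456789") == ""
-- ===== Notes on version B (the rewrite author's own statement) =====
-- stated objective: idiomatic
-- what changed: Instead of A's nested index loops with break flags over every character, B strips all allowed characters (space and digits) from both ends of the string with str.strip and accepts iff the residual string is empty; no per-character boolean accumulator exists.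
import Mathlib
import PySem

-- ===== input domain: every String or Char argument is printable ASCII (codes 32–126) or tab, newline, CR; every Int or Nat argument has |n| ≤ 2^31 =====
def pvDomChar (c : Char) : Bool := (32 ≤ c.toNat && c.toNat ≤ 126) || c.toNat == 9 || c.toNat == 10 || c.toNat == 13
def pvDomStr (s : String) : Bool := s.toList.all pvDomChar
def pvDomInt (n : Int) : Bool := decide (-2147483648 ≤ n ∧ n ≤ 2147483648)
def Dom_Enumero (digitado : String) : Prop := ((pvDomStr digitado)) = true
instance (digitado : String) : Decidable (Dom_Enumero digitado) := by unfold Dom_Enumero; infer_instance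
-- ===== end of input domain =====

-- B replaces A's nested index loops with break flags by one str.strip call: strip every
-- allowed character (space and the ten digits) from both ends and accept iff nothing remains.

-- ===== PORT A =====
-- inner 'for l in range(0, 10)' loop: breaks (leaving veredito = False) as soon as the test fires
def EnumeroInner (ch : Char) (veredito : Bool) : Nat → Bool
  | 0 => veredito
  | Nat.succ l =>
      if !((" 0123456789".toList).contains ch) then false
      else EnumeroInner ch veredito l

-- outer 'for c in range(0, len(digitado))' loop with 'if not veredito: break'
def EnumeroOuter (s : List Char) : List Nat → Bool → Bool
  | [], veredito => veredito
  | c :: rest, veredito =>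
      let veredito := EnumeroInner (s.getD c ' ') veredito 10
      if !veredito then veredito else EnumeroOuter s rest veredito

def Enumero (digitado : String) : Bool :=
  EnumeroOuter digitado.toList (List.range digitado.toList.length) true

-- ===== PORT B =====
-- str(digitado).strip(" 0123456789") == ""  — PySem.Str.stripChars is Python's s.strip(chars)
def Enumero_alt (digitado : String) : Bool :=
  PySem.Str.stripChars digitado " 0123456789" == ""

-- ===== PRECONDITION & SPEC =====
def Spec_Enumero (digitado : String) (out : Bool) : Prop := out = Enumero_alt digitado
instance (digitado : String) (out : Bool) : Decidable (Spec_Enumero digitado out) := by unfold Spec_Enumero; infer_instance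

-- ===== CLAIM (what is proved, stated in full; the proofs are below) =====
def Claim_equal_Enumero : Prop := ∀ (digitado : String), Dom_Enumero digitado → Spec_Enumero digitado (Enumero digitado)

-- ===== LEMMAS AND PROOFS =====

theorem EnumeroInner_eq (ch : Char) (v : Bool) (n : Nat) :
    EnumeroInner ch v (n + 1) = (((" 0123456789".toList).contains ch) && v) := by
  induction n with
  | zero =>
      rcases hb : (" 0123456789".toList).contains ch <;>
        simp only [EnumeroInner, hb] <;> simp
  | succ n ih =>
      rcases hb : (" 0123456789".toList).contains ch <;>
        simp only [EnumeroInner, hb] at ih ⊢ <;> simp_all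

theorem EnumeroOuter_eq (s : List Char) (idxs : List Nat) (v : Bool) :
    EnumeroOuter s idxs v =
      (v && idxs.all (fun c => (" 0123456789".toList).contains (s.getD c ' '))) := by
  induction idxs generalizing v with
  | nil => simp [EnumeroOuter]
  | cons c rest ih =>
      simp only [EnumeroOuter, EnumeroInner_eq (s.getD c ' ') v 9, List.all_cons]
      generalize (" 0123456789".toList).contains (s.getD c ' ') = b
      cases b <;> cases v <;> simp [ih]

theorem all_range_getD (l : List Char) (p : Char → Bool) :
    (List.range l.length).all (fun i => p (l.getD i ' ')) = l.all p := by
  rw [Bool.eq_iff_iff]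
  simp only [List.all_eq_true, List.mem_range]
  constructor
  · intro h x hx
    obtain ⟨i, hi, rfl⟩ := List.mem_iff_getElem.mp hx
    have := h i hi
    rwa [List.getD_eq_getElem l ' ' hi] at this
  · intro h i hi
    rw [List.getD_eq_getElem l ' ' hi]
    exact h _ (List.getElem_mem hi)

-- stripping a character class from both ends leaves the empty list iff every character is in the class
theorem stripChars_eq_nil_iff (l chars : List Char) :
    PySem.Chars.stripChars l chars = [] ↔ ∀ x ∈ l, chars.contains x = true := by
  unfold PySem.Chars.stripChars
  simp only [List.reverse_eq_nil_iff, List.dropWhile_eq_nil_iff, List.mem_reverse]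
  constructor
  · intro h x hx
    rcases List.mem_append.mp
        ((List.takeWhile_append_dropWhile (p := fun c => chars.contains c) (l := l)) ▸ hx) with h1 | h2
    · exact List.mem_takeWhile_imp h1
    · exact h x h2
  · intro h x hx
    exact h x (List.dropWhile_subset _ hx)

theorem alt_eq_all (digitado : String) :
    Enumero_alt digitado =
      digitado.toList.all (fun c => (" 0123456789".toList).contains c) := by
  unfold Enumero_alt
  rw [Bool.eq_iff_iff, beq_iff_eq, List.all_eq_true, ← String.toList_inj,
    PySem.Str.toList_stripChars]
  exact stripChars_eq_nil_iff _ _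

-- ===== VERDICT (by name: the statement is the Claim_ definition above) =====
theorem Enumero_spec : Claim_equal_Enumero := by
  intro digitado _
  unfold Spec_Enumero Enumero
  rw [EnumeroOuter_eq, Bool.true_and, all_range_getD, alt_eq_all]
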